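-- pv_equiv track=rewrite | github.com/pypi-data/pypi-mirror-391 | packages/mcp-marketplace/mcp_marketplace-0.1.0-py3-none-any.whl/mcp_marketplace/app/mcp_tool_use/src/mcp_servers.py | check_tool_input
-- ===== SOURCE A (Python) =====
-- def check_tool_input(tool_input):
--     if tool_input is None:
--         return False, "check_tool_input Tool Input is Empty..."
--     missing_fields = []
--     for key, value in tool_input.items():
--         if value is None:
--             missing_fields.append(key)
--         elif isinstance(value, str) and value.strip() == "":
--             missing_fields.append(key)
--         else:
--             continue
--     # all parameters are empty return
--     if len(missing_fields) == len(tool_input):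
--         return False, f"check_tool_input tool_input {tool_input} all values empty, missing values {missing_fields} "
--     return True, "check_tool_input Pass..."
-- ===== SOURCE B (Python) =====
-- def check_tool_input(tool_input):
--     if tool_input is None:
--         return False, "check_tool_input Tool Input is Empty..."
--     return _scan(list(tool_input.items()), tool_input)
--
-- def _scan(items, tool_input):
--     # recursion on the item list: no accumulator, no length comparison;
--     # first non-empty value short-circuits, exhaustion means all values empty
--     if not items:
--         missing_fields = list(tool_input.keys())
--         return False, f"check_tool_input tool_input {tool_input} all values empty, missing values {missing_fields} "
--     (key, value) = items[0]
--     if value is not None and not (isinstance(value, str) and value.strip() == ""):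
--         return True, "check_tool_input Pass..."
--     return _scan(items[1:], tool_input)
-- ===== Notes on version B (the rewrite author's own statement) =====
-- stated objective: alternative
-- what changed: Replaces A's accumulate-missing-list-then-compare-lengths loop with direct structural recursion over the items: the first non-empty value returns Pass immediately, and only on exhaustion (all values empty) is the missing list taken as the whole key list.
import Mathlib
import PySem

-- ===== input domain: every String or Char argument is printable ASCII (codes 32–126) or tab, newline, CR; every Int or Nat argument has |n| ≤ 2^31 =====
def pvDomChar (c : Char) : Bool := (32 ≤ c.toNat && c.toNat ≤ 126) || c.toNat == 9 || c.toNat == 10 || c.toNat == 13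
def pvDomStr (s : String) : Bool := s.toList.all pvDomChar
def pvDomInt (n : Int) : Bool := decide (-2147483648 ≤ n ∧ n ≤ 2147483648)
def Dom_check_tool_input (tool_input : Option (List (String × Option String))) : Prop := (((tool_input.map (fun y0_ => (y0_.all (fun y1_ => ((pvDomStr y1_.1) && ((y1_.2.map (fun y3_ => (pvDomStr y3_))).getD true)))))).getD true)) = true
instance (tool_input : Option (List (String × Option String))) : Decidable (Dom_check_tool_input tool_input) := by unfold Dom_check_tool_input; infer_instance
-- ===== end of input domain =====

-- B replaces A's accumulate-missing-list-then-compare-lengths loop with direct structural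
-- recursion over the items (first non-empty value short-circuits; exhaustion = all empty).

-- ── shared f-string rendering helpers (Python repr of str / dict / list, exact on the ASCII domain) ──
def pyReprStr (s : String) : String :=
  let cs := s.toList
  let q : Char := if cs.contains '\'' && !cs.contains '"' then '"' else '\''
  let body := cs.flatMap (fun c =>
    if c = '\\' then ['\\', '\\']
    else if c = q then ['\\', q]
    else if c = '\t' then ['\\', 't']
    else if c = '\n' then ['\\', 'n']
    else if c = '\r' then ['\\', 'r']
    else [c])
  String.ofList (q :: body ++ [q])

def pyReprVal (v : Option String) : String :=
  match v with
  | none => "None"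
  | some s => pyReprStr s

def pyReprDict (items : List (String × Option String)) : String :=
  "{" ++ String.intercalate ", " (items.map (fun kv => pyReprStr kv.1 ++ ": " ++ pyReprVal kv.2)) ++ "}"

def pyReprKeys (ks : List String) : String :=
  "[" ++ String.intercalate ", " (ks.map pyReprStr) ++ "]"

-- ===== PORT A =====
def check_tool_input (tool_input : Option (List (String × Option String))) : Bool × String :=
  match tool_input with
  | none => (false, "check_tool_input Tool Input is Empty...")
  | some items =>
    let missing_fields := items.foldl (fun acc kv =>
      match kv.2 with
      | none => acc ++ [kv.1]
      | some s => if PySem.Str.strip s == "" then acc ++ [kv.1] else acc) []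
    if missing_fields.length = items.length then
      (false, "check_tool_input tool_input " ++ pyReprDict items ++
              " all values empty, missing values " ++ pyReprKeys missing_fields ++ " ")
    else
      (true, "check_tool_input Pass...")

-- ===== PORT B =====
-- recursive scan: Pass on the first non-empty value, all-empty message on exhaustion
def pvScan (items : List (String × Option String)) (tool_input : List (String × Option String)) : Bool × String :=
  match items with
  | [] =>
    (false, "check_tool_input tool_input " ++ pyReprDict tool_input ++
            " all values empty, missing values " ++ pyReprKeys (tool_input.map Prod.fst) ++ " ")
  | kv :: rest =>
    if (match kv.2 with
        | none => false
        | some s => !(PySem.Str.strip s == "")) then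
      (true, "check_tool_input Pass...")
    else
      pvScan rest tool_input

def check_tool_input_alt (tool_input : Option (List (String × Option String))) : Bool × String :=
  match tool_input with
  | none => (false, "check_tool_input Tool Input is Empty...")
  | some items => pvScan items items

-- ===== PRECONDITION & SPEC =====
def Spec_check_tool_input (tool_input : Option (List (String × Option String))) (out : Bool × String) : Prop := out = check_tool_input_alt tool_input
instance (tool_input : Option (List (String × Option String))) (out : Bool × String) : Decidable (Spec_check_tool_input tool_input out) := by unfold Spec_check_tool_input; infer_instance

-- ===== CLAIM (what is proved, stated in full; the proofs are below) =====
def Claim_equal_check_tool_input : Prop := ∀ (tool_input : Option (List (String × Option String))), Dom_check_tool_input tool_input → Spec_check_tool_input tool_input (check_tool_input tool_input)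

-- ===== LEMMAS AND PROOFS =====

def pvIsEmpty (v : Option String) : Bool :=
  match v with
  | none => true
  | some s => PySem.Str.strip s == ""

-- A's accumulating loop builds acc ++ the keys of the empty-valued items, in order.
theorem foldl_missing (items : List (String × Option String)) (acc : List String) :
    items.foldl (fun acc kv =>
      match kv.2 with
      | none => acc ++ [kv.1]
      | some s => if PySem.Str.strip s == "" then acc ++ [kv.1] else acc) acc
    = acc ++ (items.filter (fun kv => pvIsEmpty kv.2)).map Prod.fst := by
  induction items generalizing acc with
  | nil => simp
  | cons kv rest ih =>
    obtain ⟨k, v⟩ := kv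
    cases v with
    | none =>
      simp only [List.foldl]
      rw [ih]
      simp [pvIsEmpty, List.filter]
    | some s =>
      by_cases h : (PySem.Str.strip s == "") = true
      · simp only [List.foldl]
        rw [if_pos h, ih]
        simp [List.filter, pvIsEmpty, h]
      · simp only [List.foldl]
        rw [if_neg h, ih]
        simp [List.filter, pvIsEmpty, h]

-- if filtering drops nothing by length, the predicate holds on every element
theorem filter_full_of_length {α : Type} (p : α → Bool) (l : List α)
    (h : (l.filter p).length = l.length) : ∀ a ∈ l, p a := by
  induction l with
  | nil => simp
  | cons a t ih =>
    by_cases hp : p a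
    · intro x hx
      rcases List.mem_cons.mp hx with rfl | hx'
      · exact hp
      · exact ih (by simpa [List.filter, hp] using h) x hx'
    · exfalso
      have hle := List.length_filter_le p t
      simp [List.filter, hp] at h
      omega

-- B's recursive scan, characterised: all-empty vs some non-empty value
theorem pvScan_eq (items orig : List (String × Option String)) :
    pvScan items orig =
      if items.all (fun kv => pvIsEmpty kv.2) then
        (false, "check_tool_input tool_input " ++ pyReprDict orig ++
                " all values empty, missing values " ++ pyReprKeys (orig.map Prod.fst) ++ " ")
      else (true, "check_tool_input Pass...") := by
  induction items with
  | nil => simp [pvScan]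
  | cons kv rest ih =>
    obtain ⟨k, v⟩ := kv
    cases v with
    | none => simpa [pvScan, pvIsEmpty] using ih
    | some s =>
      by_cases h : (PySem.Str.strip s == "") = true
      · have hstep : pvScan ((k, some s) :: rest) orig = pvScan rest orig := by
          simp [pvScan, h]
        rw [hstep, ih]
        simp only [List.all_cons, pvIsEmpty, h, Bool.true_and]
        rfl
      · simp [pvScan, pvIsEmpty, h]

-- ===== VERDICT (by name: the statement is the Claim_ definition above) =====
theorem check_tool_input_spec : Claim_equal_check_tool_input := by
  intro ti _
  unfold Spec_check_tool_input
  cases ti with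
  | none => rfl
  | some items =>
    simp only [check_tool_input, check_tool_input_alt, foldl_missing, List.nil_append,
      pvScan_eq]
    by_cases h : ∀ kv ∈ items, pvIsEmpty kv.2
    · have hf : items.filter (fun kv => pvIsEmpty kv.2) = items := List.filter_eq_self.mpr h
      have ha : items.all (fun kv => pvIsEmpty kv.2) = true := List.all_eq_true.mpr h
      rw [hf, ha]
      simp
    · push_neg at h
      obtain ⟨kv, hkv, hne⟩ := h
      have ha : items.all (fun kv => pvIsEmpty kv.2) = false := by
        simp only [List.all_eq_false]
        exact ⟨kv, hkv, by simp [hne]⟩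
      have hlt : ((items.filter (fun kv => pvIsEmpty kv.2)).map Prod.fst).length ≠ items.length := by
        rw [List.length_map]
        intro heq
        exact hne (filter_full_of_length _ _ heq kv hkv)
      rw [ha, if_neg hlt]
      simp
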